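-- pv_equiv track=rewrite | github.com/pypi-data/pypi-mirror-368 | packages/giv/giv-0.5.6-py3-none-any.whl/giv/lib/markdown.py | normalize_blank_lines
-- ===== SOURCE A (Python) =====
-- def normalize_blank_lines(text: str) -> str:
--     """Collapse multiple blank lines to one, ensure exactly one blank at EOF."""
--     if not text:
--         return text
--
--     lines = text.splitlines()
--     normalized_lines = []
--     prev_blank = False
--
--     for line in lines:
--         is_blank = not line.strip()
--
--         if is_blank:
--             if not prev_blank:
--                 normalized_lines.append('')
--             prev_blank = True
--         else:
--             normalized_lines.append(line)
--             prev_blank = False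
--
--     # Ensure exactly one blank line at end if there was content
--     if normalized_lines and not prev_blank:
--         normalized_lines.append('')
--
--     return '\n'.join(normalized_lines)
-- ===== SOURCE B (Python) =====
-- def normalize_blank_lines(text: str) -> str:
--     """Collapse multiple blank lines to one, ensure exactly one blank at EOF."""
--     if not text:
--         return text
--
--     lines = text.splitlines()
--
--     # Gather maximal runs of non-blank lines as paragraphs; blanks only separate.
--     paragraphs = []
--     current = []
--     for line in lines:
--         if line.strip():
--             current.append(line)
--         elif current:
--             paragraphs.append(current)
--             current = []
--     if current:
--         paragraphs.append(current)
--
--     if not paragraphs: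
--         return ""
--
--     lead = "\n" if not lines[0].strip() else ""
--     return lead + "\n\n".join("\n".join(p) for p in paragraphs) + "\n"
-- ===== Notes on version B (the rewrite author's own statement) =====
-- stated objective: alternative
-- what changed: Replaces A's line-by-line streaming with a prev_blank flag by gathering maximal runs of non-blank lines into a paragraph list and emitting it once, paragraphs joined by a blank-line separator plus a computed leading and trailing newline.
import Mathlib
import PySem

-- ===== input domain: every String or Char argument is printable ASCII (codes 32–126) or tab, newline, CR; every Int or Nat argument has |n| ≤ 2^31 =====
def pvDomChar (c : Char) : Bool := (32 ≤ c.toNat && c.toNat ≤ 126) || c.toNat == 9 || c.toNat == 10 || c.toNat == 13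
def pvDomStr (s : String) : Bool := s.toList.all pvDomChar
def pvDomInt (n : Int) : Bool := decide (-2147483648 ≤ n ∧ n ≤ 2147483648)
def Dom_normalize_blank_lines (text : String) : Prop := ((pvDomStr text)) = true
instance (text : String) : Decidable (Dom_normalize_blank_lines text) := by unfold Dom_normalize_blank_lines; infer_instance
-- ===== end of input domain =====

-- B replaces A's streaming prev_blank flag by gathering paragraphs (maximal runs of
-- non-blank lines) and joining them with "\n\n" plus a computed lead/trailing newline
-- (objective: alternative decomposition, same O(n) cost).

-- ===== PORT A =====
def normalize_blank_lines (text : String) : String :=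
  if text = "" then text
  else
    let lines := PySem.Str.splitlines text
    -- for line in lines: maintain (normalized_lines, prev_blank)
    let st := lines.foldl (fun (st : List String × Bool) line =>
      if PySem.Str.strip line = "" then            -- is_blank = not line.strip()
        (if st.2 then st.1 else st.1 ++ [""], true)
      else
        (st.1 ++ [line], false)) ([], false)
    let normalized := if st.1 ≠ [] ∧ st.2 = false then st.1 ++ [""] else st.1
    PySem.Str.join "\n" normalized

-- ===== PORT B =====
def normalize_blank_lines_alt (text : String) : String :=
  if text = "" then text
  else
    let lines := PySem.Str.splitlines text
    -- gather maximal runs of non-blank lines: state (paragraphs, current)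
    let st := lines.foldl (fun (st : List (List String) × List String) line =>
      if PySem.Str.strip line ≠ "" then (st.1, st.2 ++ [line])
      else if st.2 ≠ [] then (st.1 ++ [st.2], []) else st) ([], [])
    let paragraphs := if st.2 ≠ [] then st.1 ++ [st.2] else st.1
    if paragraphs = [] then ""
    else
      -- lines[0] in Source B; lines ≠ [] here since paragraphs ≠ [], so headD is exact
      let lead := if PySem.Str.strip (lines.headD "") = "" then "\n" else ""
      lead ++ PySem.Str.join "\n\n" (paragraphs.map (fun p => PySem.Str.join "\n" p)) ++ "\n"

-- ===== PRECONDITION & SPEC =====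
def Spec_normalize_blank_lines (text : String) (out : String) : Prop := out = normalize_blank_lines_alt text
instance (text : String) (out : String) : Decidable (Spec_normalize_blank_lines text out) := by unfold Spec_normalize_blank_lines; infer_instance

-- ===== CLAIM (what is proved, stated in full; the proofs are below) =====
def Claim_equal_normalize_blank_lines : Prop := ∀ (text : String), Dom_normalize_blank_lines text → Spec_normalize_blank_lines text (normalize_blank_lines text)

-- ===== LEMMAS AND PROOFS =====

def pvBlank (l : String) : Bool := PySem.Str.strip l = ""

def pvStepA (st : List String × Bool) (line : String) : List String × Bool :=
  if PySem.Str.strip line = "" then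
    (if st.2 then st.1 else st.1 ++ [""], true)
  else
    (st.1 ++ [line], false)

def pvStepB (st : List (List String) × List String) (line : String) :
    List (List String) × List String :=
  if PySem.Str.strip line ≠ "" then (st.1, st.2 ++ [line])
  else if st.2 ≠ [] then (st.1 ++ [st.2], []) else st

def pvFlat (ps : List (List String)) : List String := ps.flatMap (fun p => p ++ [""])

def pvState (lead : Bool) (ps : List (List String)) (cur : List String) :
    List String × Bool :=
  ((if lead then [""] else []) ++ pvFlat ps ++ cur, cur.isEmpty && (lead || !ps.isEmpty))

def pvHeadBlank : List String → Bool
  | [] => false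
  | l :: _ => pvBlank l

def pvLeadOut (ls : List String) (lead : Bool) (ps : List (List String))
    (cur : List String) : Bool :=
  lead || (ps.isEmpty && cur.isEmpty && pvHeadBlank ls)

-- The bisimulation: A's fold state is determined by B's fold state plus the lead flag.
lemma pvG (ls : List String) : ∀ (lead : Bool) (ps : List (List String)) (cur : List String),
    List.foldl pvStepA (pvState lead ps cur) ls =
      pvState (pvLeadOut ls lead ps cur) (List.foldl pvStepB (ps, cur) ls).1
        (List.foldl pvStepB (ps, cur) ls).2 := by
  induction ls with
  | nil => intro lead ps cur; simp [pvLeadOut, pvHeadBlank]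
  | cons l t ih =>
    intro lead ps cur
    simp only [List.foldl_cons]
    by_cases hb : PySem.Str.strip l = ""
    · by_cases hc : cur = []
      · subst hc
        by_cases hl : lead = true
        · subst hl
          have h1 : pvStepA (pvState true ps []) l = pvState true ps [] := by
            simp [pvStepA, pvState, hb]
          have h2 : pvStepB (ps, []) l = (ps, []) := by
            simp [pvStepB, hb]
          rw [h1, h2, ih]
          congr 1
        · have hl' : lead = false := by simpa using hl
          subst hl'
          cases ps with
          | nil =>
            have h1 : pvStepA (pvState false [] []) l = pvState true [] [] := by
              simp [pvStepA, pvState, pvFlat, hb]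
            have h2 : pvStepB ([], []) l = ([], []) := by
              simp [pvStepB, hb]
            rw [h1, h2, ih]
            congr 1
            simp [pvLeadOut, pvHeadBlank, pvBlank, hb]
          | cons p ps' =>
            have h1 : pvStepA (pvState false (p :: ps') []) l = pvState false (p :: ps') [] := by
              simp [pvStepA, pvState, hb]
            have h2 : pvStepB (p :: ps', []) l = (p :: ps', []) := by
              simp [pvStepB, hb]
            rw [h1, h2, ih]
            congr 1
      · cases cur with
        | nil => exact absurd rfl hc
        | cons c cs =>
          have h1 : pvStepA (pvState lead ps (c :: cs)) l = pvState lead (ps ++ [c :: cs]) [] := by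
            simp [pvStepA, pvState, pvFlat, hb]
          have h2 : pvStepB (ps, c :: cs) l = (ps ++ [c :: cs], []) := by
            simp [pvStepB, hb]
          rw [h1, h2, ih]
          congr 1
          simp [pvLeadOut]
    · have h1 : pvStepA (pvState lead ps cur) l = pvState lead ps (cur ++ [l]) := by
        simp [pvStepA, pvState, hb]
      have h2 : pvStepB (ps, cur) l = (ps, cur ++ [l]) := by simp [pvStepB, hb]
      rw [h1, h2, ih]
      congr 1
      simp [pvLeadOut, pvHeadBlank, pvBlank, hb]

-- every finished paragraph is nonempty
lemma pvNonempty (ls : List String) : ∀ (ps : List (List String)) (cur : List String),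
    (∀ p ∈ ps, p ≠ []) →
    ∀ p ∈ (List.foldl pvStepB (ps, cur) ls).1, p ≠ [] := by
  induction ls with
  | nil => intro ps cur h; simpa using h
  | cons l t ih =>
    intro ps cur h
    simp only [List.foldl_cons]
    by_cases hb : PySem.Str.strip l = ""
    · by_cases hc : cur = []
      · subst hc
        have h2 : pvStepB (ps, []) l = (ps, []) := by simp [pvStepB, hb]
        rw [h2]; exact ih ps [] h
      · have h2 : pvStepB (ps, cur) l = (ps ++ [cur], []) := by simp [pvStepB, hb, hc]
        rw [h2]
        refine ih _ _ ?_
        intro p hp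
        rcases List.mem_append.mp hp with hp | hp
        · exact h p hp
        · simp at hp; subst hp; exact hc
    · have h2 : pvStepB (ps, cur) l = (ps, cur ++ [l]) := by simp [pvStepB, hb]
      rw [h2]; exact ih _ _ h

lemma pvInterAppend (s : List Char) :
    ∀ (as bs : List (List Char)), as ≠ [] → bs ≠ [] →
    List.intercalate s (as ++ bs) = List.intercalate s as ++ s ++ List.intercalate s bs := by
  intro as
  induction as with
  | nil => intro bs h; exact absurd rfl h
  | cons a t ih =>
    intro bs _ hbs
    cases t with
    | nil =>
      cases bs with
      | nil => exact absurd rfl hbs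
      | cons b u =>
        simp [List.intercalate, List.intersperse]
    | cons a' t' =>
      have := ih bs (by simp) hbs
      calc List.intercalate s ((a :: a' :: t') ++ bs)
          = a ++ s ++ List.intercalate s ((a' :: t') ++ bs) := by
            simp [List.intercalate]
        _ = a ++ s ++ (List.intercalate s (a' :: t') ++ s ++ List.intercalate s bs) := by
            rw [this]
        _ = List.intercalate s (a :: a' :: t') ++ s ++ List.intercalate s bs := by
            simp [List.intercalate, List.intersperse]

-- the string identity: joining the flattened paragraph list with '\n' equals
-- "\n\n"-joined paragraphs with a trailing '\n'
lemma pvJoinFlat : ∀ (qs : List (List (List Char))), qs ≠ [] → (∀ q ∈ qs, q ≠ []) →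
    List.intercalate ['\n'] (qs.flatMap (fun q => q ++ [[]])) =
      List.intercalate ['\n', '\n'] (qs.map (List.intercalate ['\n'])) ++ ['\n'] := by
  intro qs
  induction qs with
  | nil => intro h; exact absurd rfl h
  | cons q t ih =>
    intro _ hne
    have hq : q ≠ [] := hne q (by simp)
    cases t with
    | nil =>
      simp only [List.flatMap_cons, List.flatMap_nil, List.append_nil, List.map_cons,
        List.map_nil]
      rw [pvInterAppend ['\n'] q [[]] hq (by simp)]
      simp [List.intercalate]
    | cons q' t' =>
      have ht : (q' :: t') ≠ [] := by simp
      have hflat : (q' :: t').flatMap (fun q => q ++ [[]]) ≠ [] := by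
        have hq' : q' ≠ [] := hne q' (by simp)
        cases q' with
        | nil => exact absurd rfl hq'
        | cons c cs => simp
      calc List.intercalate ['\n'] ((q :: q' :: t').flatMap (fun q => q ++ [[]]))
          = List.intercalate ['\n'] ((q ++ [[]]) ++ (q' :: t').flatMap (fun q => q ++ [[]])) := by
            simp
        _ = (List.intercalate ['\n'] q ++ ['\n']) ++ ['\n'] ++
              List.intercalate ['\n'] ((q' :: t').flatMap (fun q => q ++ [[]])) := by
            rw [pvInterAppend ['\n'] (q ++ [[]]) _ (by simp [hq]) hflat,
              pvInterAppend ['\n'] q [[]] hq (by simp)]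
            simp [List.intercalate]
        _ = (List.intercalate ['\n'] q ++ ['\n', '\n']) ++
              (List.intercalate ['\n', '\n'] ((q' :: t').map (List.intercalate ['\n'])) ++ ['\n']) := by
            rw [ih ht (fun p hp => hne p (by simp [hp]))]
            simp
        _ = List.intercalate ['\n', '\n'] ((q :: q' :: t').map (List.intercalate ['\n'])) ++ ['\n'] := by
            simp [List.intercalate]

lemma pvJoinMain (L : Bool) (paras : List (List String)) (hne : paras ≠ [])
    (hall : ∀ p ∈ paras, p ≠ []) :
    PySem.Str.join "\n" ((if L then [""] else []) ++ pvFlat paras) =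
      (if L then "\n" else "") ++
        PySem.Str.join "\n\n" (paras.map (fun p => PySem.Str.join "\n" p)) ++ "\n" := by
  apply String.toList_inj.mp
  have h1 : ("\n" : String).toList = ['\n'] := by decide
  have h2 : ("\n\n" : String).toList = ['\n', '\n'] := by decide
  have h0 : ("" : String).toList = [] := by decide
  have hmap : ∀ ps : List (List String), (pvFlat ps).map String.toList =
      (ps.map (List.map String.toList)).flatMap (fun q => q ++ [[]]) := by
    intro ps
    induction ps with
    | nil => simp [pvFlat]
    | cons p t ih =>
      simp only [pvFlat, List.flatMap_cons, List.map_cons, List.map_append] at ih ⊢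
      simp [ih, h0]
  have hqs_ne : paras.map (List.map String.toList) ≠ [] := by
    cases paras with
    | nil => exact absurd rfl hne
    | cons p t => simp
  have hqs_all : ∀ q ∈ paras.map (List.map String.toList), q ≠ [] := by
    intro q hqmem
    rcases List.mem_map.mp hqmem with ⟨p, hp, rfl⟩
    have := hall p hp
    cases p with
    | nil => exact absurd rfl this
    | cons a b => simp
  have key := pvJoinFlat (paras.map (List.map String.toList)) hqs_ne hqs_all
  have hj' : paras.map (String.toList ∘ fun p => PySem.Str.join "\n" p) =
      (paras.map (List.map String.toList)).map (List.intercalate ['\n']) := by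
    rw [List.map_map]
    apply List.map_congr_left
    intro p _
    simp [PySem.Str.toList_join, PySem.Chars.join, h1]
  rw [String.toList_append, String.toList_append, PySem.Str.toList_join, PySem.Str.toList_join,
    h1, h2]
  simp only [PySem.Chars.join, List.map_map]
  cases L with
  | false =>
    simp only [Bool.false_eq_true, if_false, List.nil_append, h0]
    rw [hmap paras, key, hj']
  | true =>
    simp only [if_true]
    have hflatne : (paras.map (List.map String.toList)).flatMap (fun q => q ++ [[]]) ≠ [] := by
      cases paras with
      | nil => exact absurd rfl hne
      | cons p t =>
        have hp : p ≠ [] := hall p (by simp)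
        cases p with
        | nil => exact absurd rfl hp
        | cons a b => simp
    rw [List.map_append, hmap paras,
      show (([""] : List String).map String.toList) = [[]] from by simp [h0],
      pvInterAppend ['\n'] [[]] _ (by simp) hflatne, key,
      show List.intercalate ['\n'] [([] : List Char)] = [] from by simp [List.intercalate],
      hj', h1]
    simp

-- ===== VERDICT (by name: the statement is the Claim_ definition above) =====
theorem normalize_blank_lines_spec : Claim_equal_normalize_blank_lines := by
  intro text _
  unfold Spec_normalize_blank_lines normalize_blank_lines normalize_blank_lines_alt
  by_cases ht : text = ""
  · simp [ht]
  · simp only [if_neg ht]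
    set lines := PySem.Str.splitlines text with hlines
    have hA : (fun (st : List String × Bool) line =>
        if PySem.Str.strip line = "" then
          (if st.2 then st.1 else st.1 ++ [""], true)
        else (st.1 ++ [line], false)) = pvStepA := by
      funext st line; simp [pvStepA]
    have hB : (fun (st : List (List String) × List String) line =>
        if PySem.Str.strip line ≠ "" then (st.1, st.2 ++ [line])
        else if st.2 ≠ [] then (st.1 ++ [st.2], []) else st) = pvStepB := by
      funext st line; simp [pvStepB]
    rw [hA, hB]
    have hinit : (([], false) : List String × Bool) = pvState false [] [] := by
      simp [pvState, pvFlat]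
    rw [hinit, pvG]
    set st := List.foldl pvStepB ([], []) lines with hst
    set L := pvLeadOut lines false [] [] with hL
    set paragraphs := if st.2 ≠ [] then st.1 ++ [st.2] else st.1 with hparas
    have hallps : ∀ p ∈ st.1, p ≠ [] := pvNonempty lines [] [] (by simp)
    by_cases hp : paragraphs = []
    · -- both sides are ""
      have hps1 : st.1 = [] := by
        by_cases h2 : st.2 = []
        · simpa [hparas, h2] using hp
        · exfalso; simp [hparas, h2] at hp
      have hps2 : st.2 = [] := by
        by_cases h2 : st.2 = []
        · exact h2
        · exfalso; simp [hparas, h2] at hp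
      rw [if_pos hp, hps1, hps2]
      by_cases hL1 : L = true
      · rw [hL1]; decide
      · rw [(by simpa using hL1 : L = false)]; decide
    · rw [if_neg hp]
      have hallp : ∀ p ∈ paragraphs, p ≠ [] := by
        intro p hmem
        by_cases h2 : st.2 = []
        · rw [hparas] at hmem; simp [h2] at hmem; exact hallps p hmem
        · rw [hparas, if_pos h2] at hmem
          rcases List.mem_append.mp hmem with h | h
          · exact hallps p h
          · simp at h; subst h; exact h2
      -- lines is nonempty: otherwise st = ([],[]) and paragraphs = []
      have hlne : lines ≠ [] := by
        intro h
        rw [h] at hst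
        simp at hst
        rw [hparas, hst] at hp
        simp at hp
      -- the finalized A list is (if L then [""] else []) ++ pvFlat paragraphs
      have hfin : (if (pvState L st.1 st.2).1 ≠ [] ∧ (pvState L st.1 st.2).2 = false
            then (pvState L st.1 st.2).1 ++ [""] else (pvState L st.1 st.2).1) =
          (if L then [""] else []) ++ pvFlat paragraphs := by
        by_cases h2 : st.2 = []
        · -- prev_blank is true (L or ps nonempty), no trailing append
          have hps1 : st.1 ≠ [] ∨ L = true := by
            by_cases hL1 : L = true
            · exact Or.inr hL1
            · left
              intro hnil
              rw [hparas, if_neg (by simp [h2]), hnil] at hp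
              exact hp rfl
          have hsnd : (pvState L st.1 st.2).2 = true := by
            rcases hps1 with h | h
            · simp [pvState, h2, h]
            · simp [pvState, h2, h]
          rw [if_neg (by simp [hsnd])]
          simp [pvState, hparas, h2]
        · -- current paragraph open: prev_blank false, trailing '' appended
          obtain ⟨a, b, hab⟩ : ∃ a b, st.2 = a :: b := by
            cases hst2 : st.2 with
            | nil => exact absurd hst2 h2
            | cons a b => exact ⟨a, b, rfl⟩
          have hsnd : (pvState L st.1 st.2).2 = false := by
            simp [pvState, hab]
          have hfst : (pvState L st.1 st.2).1 ≠ [] := by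
            simp [pvState, hab]
          rw [if_pos ⟨hfst, hsnd⟩]
          simp [pvState, hparas, h2, pvFlat]
      rw [hfin]
      -- B's lead equals (if L then "\n" else "")
      cases hlc : lines with
      | nil => exact absurd hlc hlne
      | cons l t =>
        have hLval : L = pvBlank l := by rw [hL, hlc]; simp [pvLeadOut, pvHeadBlank]
        have hlead : (if PySem.Str.strip ((l :: t).headD "") = "" then "\n" else "") =
            (if L then ("\n" : String) else "") := by
          rw [hLval]
          simp only [List.headD_cons, pvBlank]
          by_cases hb : PySem.Str.strip l = "" <;> simp [hb]
        rw [hlead]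
        exact pvJoinMain L paragraphs hp hallp
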